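-- pv_equiv track=rewrite | github.com/michael-123123/mde | src/fun/markdown6/graphviz_service.py | _apply_dark_mode
-- ===== SOURCE A (Python) =====
-- def _apply_dark_mode(svg: str) -> str:
--     """Apply dark mode styling to SVG.
--
--     Inverts common colors used by Graphviz.
--     """
--     # Replace common light colors with dark equivalents
--     replacements = [
--         ('fill="white"', 'fill="#1e1e1e"'),
--         ('fill="black"', 'fill="#d4d4d4"'),
--         ('stroke="black"', 'stroke="#d4d4d4"'),
--         ("fill='white'", "fill='#1e1e1e'"),
--         ("fill='black'", "fill='#d4d4d4'"),
--         ("stroke='black'", "stroke='#d4d4d4'"),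
--         # Handle none background
--         ('fill="none"', 'fill="none"'),  # Keep as-is
--     ]
--
--     for old, new in replacements:
--         svg = svg.replace(old, new)
--
--     return svg
-- ===== SOURCE B (Python) =====
-- import re
--
-- # Light Graphviz colors and their dark-theme equivalents.
-- _DARK_COLORS = {
--     'fill="white"': 'fill="#1e1e1e"',
--     'fill="black"': 'fill="#d4d4d4"',
--     'stroke="black"': 'stroke="#d4d4d4"',
--     "fill='white'": "fill='#1e1e1e'",
--     "fill='black'": "fill='#d4d4d4'",
--     "stroke='black'": "stroke='#d4d4d4'",
-- }
-- _DARK_RE = re.compile("|".join(re.escape(k) for k in _DARK_COLORS))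
--
--
-- def _apply_dark_mode(svg: str) -> str:
--     """Apply dark mode styling to SVG.
--
--     Inverts common colors used by Graphviz, in one pass over the document.
--     """
--     return _DARK_RE.sub(lambda m: _DARK_COLORS[m.group(0)], svg)
-- ===== Notes on version B (the rewrite author's own statement) =====
-- stated objective: idiomatic
-- what changed: A runs seven sequential whole-string str.replace scans (including a no-op fill="none" entry); B builds a color-substitution dict once, compiles a single regex alternation of its keys, and performs one re.sub pass over the SVG whose callback looks each match up in the dict.
import Mathlib
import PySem

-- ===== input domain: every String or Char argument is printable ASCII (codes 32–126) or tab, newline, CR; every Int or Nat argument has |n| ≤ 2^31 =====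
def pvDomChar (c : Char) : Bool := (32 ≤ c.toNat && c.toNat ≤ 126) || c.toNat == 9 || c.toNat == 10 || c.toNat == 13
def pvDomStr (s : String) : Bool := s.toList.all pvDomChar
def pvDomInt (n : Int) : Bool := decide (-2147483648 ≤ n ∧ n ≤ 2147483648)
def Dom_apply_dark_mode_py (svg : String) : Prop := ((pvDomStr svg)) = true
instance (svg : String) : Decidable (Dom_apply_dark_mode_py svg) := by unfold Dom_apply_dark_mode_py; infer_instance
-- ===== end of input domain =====

-- B replaces A's seven sequential full-string .replace scans by a substitution table
-- and one single-pass re.sub over a literal alternation (idiomatic); same return value.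


-- ===== PORT A =====
-- for old, new in replacements: svg = svg.replace(old, new)
def apply_dark_mode_py (svg : String) : String :=
  [("fill=\"white\"", "fill=\"#1e1e1e\""),
   ("fill=\"black\"", "fill=\"#d4d4d4\""),
   ("stroke=\"black\"", "stroke=\"#d4d4d4\""),
   ("fill='white'", "fill='#1e1e1e'"),
   ("fill='black'", "fill='#d4d4d4'"),
   ("stroke='black'", "stroke='#d4d4d4'"),
   ("fill=\"none\"", "fill=\"none\"")].foldl
    (fun s pr => PySem.Str.replace s pr.1 pr.2) svg

-- ===== PORT B =====
-- the _DARK_COLORS table of Source B, in dict (insertion) order; each entry (key, value),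
-- the keys being exactly the regex's escaped literal alternatives
def o1 : List Char := "fill=\"white\"".toList
def n1 : List Char := "fill=\"#1e1e1e\"".toList
def o2 : List Char := "fill=\"black\"".toList
def n2 : List Char := "fill=\"#d4d4d4\"".toList
def o3 : List Char := "stroke=\"black\"".toList
def n3 : List Char := "stroke=\"#d4d4d4\"".toList
def o4 : List Char := "fill='white'".toList
def n4 : List Char := "fill='#1e1e1e'".toList
def o5 : List Char := "fill='black'".toList
def n5 : List Char := "fill='#d4d4d4'".toList
def o6 : List Char := "stroke='black'".toList
def n6 : List Char := "stroke='#d4d4d4'".toList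

def pats : List (List Char × List Char) :=
  [(o1, n1), (o2, n2), (o3, n3), (o4, n4), (o5, n5), (o6, n6)]

-- the regex match attempt at one position: Python's re tries the alternatives of
-- 'k1|k2|…' left to right; for literal alternatives that is the first key that is a
-- prefix of the remaining text (exact port of the alternation's semantics)
def findPat : List (List Char × List Char) → List Char → Option (List Char × List Char)
  | [], _ => none
  | (p, q) :: rest, l => if p.isPrefixOf l then some (p, q) else findPat rest l

-- re.sub's single left-to-right scan: at each position emit the table value for the
-- first matching alternative and skip the match, else copy one character (exact port
-- of re.sub for this literal alternation)
def altGo : List Char → List Char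
  | [] => []
  | c :: t =>
    match findPat pats (c :: t) with
    | some (p, q) => q ++ altGo (t.drop (p.length - 1))
    | none => c :: altGo t
termination_by l => l.length
decreasing_by
  · simp only [List.length_drop, List.length_cons]; omega
  · simp

def apply_dark_mode_py_alt (svg : String) : String := String.ofList (altGo svg.toList)

-- ===== PRECONDITION & SPEC =====
def Spec_apply_dark_mode_py (svg : String) (out : String) : Prop := out = apply_dark_mode_py_alt svg
instance (svg : String) (out : String) : Decidable (Spec_apply_dark_mode_py svg out) := by unfold Spec_apply_dark_mode_py; infer_instance

-- ===== CLAIM (what is proved, stated in full; the proofs are below) =====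
def Claim_equal_apply_dark_mode_py : Prop := ∀ (svg : String), Dom_apply_dark_mode_py svg → Spec_apply_dark_mode_py svg (apply_dark_mode_py svg)

-- ===== LEMMAS AND PROOFS =====

-- recursive form of one CPython str.replace (leftmost, non-overlapping)
def repc (p q : List Char) : List Char → List Char
  | [] => []
  | c :: t => if p.isPrefixOf (c :: t) then q ++ repc p q (t.drop (p.length - 1)) else c :: repc p q t
termination_by l => l.length
decreasing_by
  · simp only [List.length_drop, List.length_cons]; omega
  · simp

-- pattern p disagrees with body v inside their common length (so p is no prefix of v ++ anything)
def conflict (p v : List Char) : Bool := (v.zip p).any (fun ab => ab.1 != ab.2)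

theorem conflict_not_prefix (p v Z : List Char) (h : conflict p v = true) :
    p.isPrefixOf (v ++ Z) = false := by
  induction v generalizing p Z with
  | nil => simp [conflict] at h
  | cons a v' ih =>
    cases p with
    | nil => simp [conflict] at h
    | cons b p' =>
      simp only [conflict, List.zip_cons_cons, List.any_cons, Bool.or_eq_true] at h
      simp only [List.cons_append, List.isPrefixOf_cons₂]
      by_cases hab : a = b
      · subst hab
        have h' : conflict p' v' = true := by
          rcases h with h | h
          · simp at h
          · exact h
        simp [ih p' Z h']
      · have : (b == a) = false := by
          simp only [beq_eq_false_iff_ne, ne_eq]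
          exact fun e => hab e.symm
        simp [this]

theorem replace_go_eq (old new : List Char) (hold : old ≠ []) :
    ∀ fuel l acc, l.length ≤ fuel →
      PySem.Chars.replace.go old new fuel l acc = acc.reverse ++ repc old new l := by
  intro fuel
  induction fuel with
  | zero =>
    intro l acc hl
    have : l = [] := by cases l <;> simp_all
    subst this
    rw [PySem.Chars.replace.go.eq_def]
    simp [repc]
  | succ fuel ih =>
    intro l acc hl
    cases l with
    | nil => rw [PySem.Chars.replace.go.eq_def]; simp [repc]
    | cons c t =>
      rw [PySem.Chars.replace.go.eq_def]
      simp only [List.length_cons, Nat.add_le_add_iff_right] at hl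
      by_cases hp : old.isPrefixOf (c :: t) = true
      · simp only [hp, if_true]
        have hdrop : List.drop old.length (c :: t) = t.drop (old.length - 1) := by
          cases old with
          | nil => exact absurd rfl hold
          | cons b o' => simp
        rw [hdrop, ih _ _ (by simp only [List.length_drop]; omega)]
        rw [repc]
        simp [hp]
      · simp only [hp]
        rw [ih _ _ hl, repc]
        simp [hp]

theorem replace_eq_repc (s old new : List Char) (hold : old ≠ []) :
    PySem.Chars.replace s old new = repc old new s := by
  rw [PySem.Chars.replace]
  have : old.isEmpty = false := by cases old <;> simp_all
  rw [this]
  simpa using replace_go_eq old new hold s.length s [] le_rfl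

-- matching the pattern p at the head of p ++ X replaces it
theorem repc_match (p q X : List Char) (hp : p ≠ []) :
    repc p q (p ++ X) = q ++ repc p q X := by
  cases p with
  | nil => exact absurd rfl hp
  | cons b p' =>
    rw [List.cons_append, repc]
    have hpre : (b :: p').isPrefixOf (b :: (p' ++ X)) = true := by
      simp
    rw [if_pos hpre]
    simp

-- a block u none of whose suffixes can start a p-match passes through repc unchanged
theorem repc_append (p q : List Char) :
    ∀ u Z, (∀ j, j < u.length → conflict p (u.drop j) = true) →
      repc p q (u ++ Z) = u ++ repc p q Z := by
  intro u
  induction u with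
  | nil => intro Z _; simp
  | cons c u' ih =>
    intro Z h
    have h0 : conflict p (c :: u') = true := by simpa using h 0 (by simp)
    have hnp : p.isPrefixOf (c :: (u' ++ Z)) = false := by
      simpa [List.cons_append] using conflict_not_prefix p (c :: u') Z h0
    rw [List.cons_append, repc, if_neg (by simp [hnp])]
    rw [ih Z (fun j hj => by simpa using h (j + 1) (by simp only [List.length_cons]; omega))]
    simp

theorem repc_self (p : List Char) (hp : p ≠ []) :
    ∀ n l, l.length ≤ n → repc p p l = l := by
  intro n
  induction n with
  | zero =>
    intro l hl
    have : l = [] := by cases l <;> simp_all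
    subst this; rw [repc]
  | succ n ih =>
    intro l hl
    cases l with
    | nil => rw [repc]
    | cons c t =>
      simp only [List.length_cons, Nat.add_le_add_iff_right] at hl
      rw [repc]
      by_cases hpre : p.isPrefixOf (c :: t) = true
      · rw [if_pos hpre]
        have hdec : p ++ (c :: t).drop p.length = c :: t :=
          List.prefix_iff_eq_append.mp (List.isPrefixOf_iff_prefix.mp hpre)
        have hdrop : (c :: t).drop p.length = t.drop (p.length - 1) := by
          cases p with
          | nil => exact absurd rfl hp
          | cons b p'' => simp
        rw [hdrop] at hdec
        rw [ih (t.drop (p.length - 1)) (by simp only [List.length_drop]; omega)]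
        exact hdec
      · rw [if_neg hpre, ih t hl]

-- a replace cannot create a new v-match at the scan position
theorem no_new (p q v : List Char)
    (hH : ∀ j, j < v.length → conflict (v.drop j) q = true) :
    ∀ n l, l.length ≤ n → v.isPrefixOf l = false → v.isPrefixOf (repc p q l) = false := by
  intro n
  induction n generalizing v with
  | zero =>
    intro l hl hpre
    have : l = [] := by cases l <;> simp_all
    subst this
    rw [repc]; exact hpre
  | succ n ih =>
    intro l hl hpre
    cases l with
    | nil => rw [repc]; exact hpre
    | cons c t =>
      simp only [List.length_cons, Nat.add_le_add_iff_right] at hl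
      rw [repc]
      by_cases hp : p.isPrefixOf (c :: t) = true
      · rw [if_pos hp]
        cases v with
        | nil => simp at hpre
        | cons a v' =>
          exact conflict_not_prefix (a :: v') q _ (by simpa using hH 0 (by simp))
      · rw [if_neg hp]
        cases v with
        | nil => simp at hpre
        | cons a v' =>
          rcases hac : a == c with _ | _
          · simp [List.isPrefixOf_cons₂, hac]
          · have hpre' : v'.isPrefixOf t = false := by
              simpa [List.isPrefixOf_cons₂, hac] using hpre
            have hrec := ih v'
              (fun j hj => by simpa using hH (j + 1) (by simp only [List.length_cons]; omega))
              t hl hpre'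
            simp [List.isPrefixOf_cons₂, hac, hrec]

-- the sequential composition of A's six effective replaces, on char lists
def chain (l : List Char) : List Char :=
  repc o6 n6 (repc o5 n5 (repc o4 n4 (repc o3 n3 (repc o2 n2 (repc o1 n1 l)))))

theorem A_eq_chain (svg : String) :
    apply_dark_mode_py svg = String.ofList (chain svg.toList) := by
  unfold apply_dark_mode_py
  simp only [List.foldl, PySem.Str.replace, String.toList_ofList]
  congr 1
  rw [replace_eq_repc _ ("fill=\"none\"".toList) _ (by decide)]
  rw [repc_self ("fill=\"none\"".toList) (by decide) _ _ le_rfl]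
  rw [replace_eq_repc _ ("fill=\"white\"".toList) _ (by decide),
      replace_eq_repc _ ("fill=\"black\"".toList) _ (by decide),
      replace_eq_repc _ ("stroke=\"black\"".toList) _ (by decide),
      replace_eq_repc _ ("fill='white'".toList) _ (by decide),
      replace_eq_repc _ ("fill='black'".toList) _ (by decide),
      replace_eq_repc _ ("stroke='black'".toList) _ (by decide)]
  simp only [chain, o1, o2, o3, o4, o5, o6, n1, n2, n3, n4, n5, n6]

theorem chain_match1 (X : List Char) : chain (o1 ++ X) = n1 ++ chain X := by
  unfold chain
  rw [repc_match o1 n1 X (by decide),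
      repc_append o2 n2 n1 _ (by decide), repc_append o3 n3 n1 _ (by decide),
      repc_append o4 n4 n1 _ (by decide), repc_append o5 n5 n1 _ (by decide),
      repc_append o6 n6 n1 _ (by decide)]

theorem chain_match2 (X : List Char) : chain (o2 ++ X) = n2 ++ chain X := by
  unfold chain
  rw [repc_append o1 n1 o2 _ (by decide), repc_match o2 n2 _ (by decide),
      repc_append o3 n3 n2 _ (by decide), repc_append o4 n4 n2 _ (by decide),
      repc_append o5 n5 n2 _ (by decide), repc_append o6 n6 n2 _ (by decide)]

theorem chain_match3 (X : List Char) : chain (o3 ++ X) = n3 ++ chain X := by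
  unfold chain
  rw [repc_append o1 n1 o3 _ (by decide), repc_append o2 n2 o3 _ (by decide),
      repc_match o3 n3 _ (by decide),
      repc_append o4 n4 n3 _ (by decide), repc_append o5 n5 n3 _ (by decide),
      repc_append o6 n6 n3 _ (by decide)]

theorem chain_match4 (X : List Char) : chain (o4 ++ X) = n4 ++ chain X := by
  unfold chain
  rw [repc_append o1 n1 o4 _ (by decide), repc_append o2 n2 o4 _ (by decide),
      repc_append o3 n3 o4 _ (by decide), repc_match o4 n4 _ (by decide),
      repc_append o5 n5 n4 _ (by decide), repc_append o6 n6 n4 _ (by decide)]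

theorem chain_match5 (X : List Char) : chain (o5 ++ X) = n5 ++ chain X := by
  unfold chain
  rw [repc_append o1 n1 o5 _ (by decide), repc_append o2 n2 o5 _ (by decide),
      repc_append o3 n3 o5 _ (by decide), repc_append o4 n4 o5 _ (by decide),
      repc_match o5 n5 _ (by decide), repc_append o6 n6 n5 _ (by decide)]

theorem chain_match6 (X : List Char) : chain (o6 ++ X) = n6 ++ chain X := by
  unfold chain
  rw [repc_append o1 n1 o6 _ (by decide), repc_append o2 n2 o6 _ (by decide),
      repc_append o3 n3 o6 _ (by decide), repc_append o4 n4 o6 _ (by decide),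
      repc_append o5 n5 o6 _ (by decide), repc_match o6 n6 _ (by decide)]

-- the no-match step: if no pattern matches at the head, every replace keeps the head char
theorem chain_cons (c : Char) (t : List Char)
    (h1 : o1.isPrefixOf (c :: t) = false) (h2 : o2.isPrefixOf (c :: t) = false)
    (h3 : o3.isPrefixOf (c :: t) = false) (h4 : o4.isPrefixOf (c :: t) = false)
    (h5 : o5.isPrefixOf (c :: t) = false) (h6 : o6.isPrefixOf (c :: t) = false) :
    chain (c :: t) = c :: chain t := by
  have nn := fun (p q v : List Char) hH l hpre =>
    no_new p q v hH l.length l le_rfl hpre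
  have k2 : o2.isPrefixOf (repc o1 n1 (c :: t)) = false := nn _ _ _ (by decide) _ h2
  have k3 : o3.isPrefixOf (repc o2 n2 (repc o1 n1 (c :: t))) = false :=
    nn _ _ _ (by decide) _ (nn _ _ _ (by decide) _ h3)
  have k4 : o4.isPrefixOf (repc o3 n3 (repc o2 n2 (repc o1 n1 (c :: t)))) = false :=
    nn _ _ _ (by decide) _ (nn _ _ _ (by decide) _ (nn _ _ _ (by decide) _ h4))
  have k5 : o5.isPrefixOf (repc o4 n4 (repc o3 n3 (repc o2 n2 (repc o1 n1 (c :: t))))) = false :=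
    nn _ _ _ (by decide) _ (nn _ _ _ (by decide) _ (nn _ _ _ (by decide) _
      (nn _ _ _ (by decide) _ h5)))
  have k6 : o6.isPrefixOf (repc o5 n5 (repc o4 n4 (repc o3 n3 (repc o2 n2
      (repc o1 n1 (c :: t)))))) = false :=
    nn _ _ _ (by decide) _ (nn _ _ _ (by decide) _ (nn _ _ _ (by decide) _
      (nn _ _ _ (by decide) _ (nn _ _ _ (by decide) _ h6))))
  unfold chain
  rw [repc, if_neg (by simp [h1])] at k2 k3 k4 k5 k6 ⊢
  rw [repc, if_neg (by simp [k2])] at k3 k4 k5 k6 ⊢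
  rw [repc, if_neg (by simp [k3])] at k4 k5 k6 ⊢
  rw [repc, if_neg (by simp [k4])] at k5 k6 ⊢
  rw [repc, if_neg (by simp [k5])] at k6 ⊢
  rw [repc, if_neg (by simp [k6])]

theorem chain_eq_altGo : ∀ n l, l.length ≤ n → chain l = altGo l := by
  intro n
  induction n with
  | zero =>
    intro l hl
    have : l = [] := by cases l <;> simp_all
    subst this
    simp [chain, repc, altGo]
  | succ n ih =>
    intro l hl
    cases l with
    | nil => simp [chain, repc, altGo]
    | cons c t =>
      simp only [List.length_cons, Nat.add_le_add_iff_right] at hl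
      have hdrople : ∀ (o : List Char), (t.drop (o.length - 1)).length ≤ n := by
        intro o; simp only [List.length_drop]; omega
      have hmatch : ∀ (o : List Char), o ≠ [] → o.isPrefixOf (c :: t) = true →
          c :: t = o ++ t.drop (o.length - 1) := by
        intro o ho hpre
        have hdec := List.prefix_iff_eq_append.mp (List.isPrefixOf_iff_prefix.mp hpre)
        have hdrop : (c :: t).drop o.length = t.drop (o.length - 1) := by
          cases o with
          | nil => exact absurd rfl ho
          | cons b o'' => simp
        rw [hdrop] at hdec
        exact hdec.symm
      by_cases p1 : o1.isPrefixOf (c :: t) = true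
      · have f : findPat pats (c :: t) = some (o1, n1) := by
          simp [findPat, pats, p1]
        have e : altGo (c :: t) = n1 ++ altGo (t.drop (o1.length - 1)) := by rw [altGo, f]
        rw [e, hmatch o1 (by decide) p1, chain_match1, ih _ (hdrople o1)]
      · have q1 := eq_false_of_ne_true p1
        by_cases p2 : o2.isPrefixOf (c :: t) = true
        · have f : findPat pats (c :: t) = some (o2, n2) := by
            simp [findPat, pats, q1, p2]
          have e : altGo (c :: t) = n2 ++ altGo (t.drop (o2.length - 1)) := by rw [altGo, f]
          rw [e, hmatch o2 (by decide) p2, chain_match2, ih _ (hdrople o2)]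
        · have q2 := eq_false_of_ne_true p2
          by_cases p3 : o3.isPrefixOf (c :: t) = true
          · have f : findPat pats (c :: t) = some (o3, n3) := by
              simp [findPat, pats, q1, q2, p3]
            have e : altGo (c :: t) = n3 ++ altGo (t.drop (o3.length - 1)) := by rw [altGo, f]
            rw [e, hmatch o3 (by decide) p3, chain_match3, ih _ (hdrople o3)]
          · have q3 := eq_false_of_ne_true p3
            by_cases p4 : o4.isPrefixOf (c :: t) = true
            · have f : findPat pats (c :: t) = some (o4, n4) := by
                simp [findPat, pats, q1, q2, q3, p4]
              have e : altGo (c :: t) = n4 ++ altGo (t.drop (o4.length - 1)) := by rw [altGo, f]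
              rw [e, hmatch o4 (by decide) p4, chain_match4, ih _ (hdrople o4)]
            · have q4 := eq_false_of_ne_true p4
              by_cases p5 : o5.isPrefixOf (c :: t) = true
              · have f : findPat pats (c :: t) = some (o5, n5) := by
                  simp [findPat, pats, q1, q2, q3, q4, p5]
                have e : altGo (c :: t) = n5 ++ altGo (t.drop (o5.length - 1)) := by rw [altGo, f]
                rw [e, hmatch o5 (by decide) p5, chain_match5, ih _ (hdrople o5)]
              · have q5 := eq_false_of_ne_true p5
                by_cases p6 : o6.isPrefixOf (c :: t) = true
                · have f : findPat pats (c :: t) = some (o6, n6) := by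
                    simp [findPat, pats, q1, q2, q3, q4, q5, p6]
                  have e : altGo (c :: t) = n6 ++ altGo (t.drop (o6.length - 1)) := by rw [altGo, f]
                  rw [e, hmatch o6 (by decide) p6, chain_match6, ih _ (hdrople o6)]
                · have q6 := eq_false_of_ne_true p6
                  have f : findPat pats (c :: t) = none := by
                    simp [findPat, pats, q1, q2, q3, q4, q5, q6]
                  have e : altGo (c :: t) = c :: altGo t := by rw [altGo, f]
                  rw [e, chain_cons c t q1 q2 q3 q4 q5 q6, ih t hl]

-- ===== VERDICT (by name: the statement is the Claim_ definition above) =====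
theorem apply_dark_mode_py_spec : Claim_equal_apply_dark_mode_py := by
  intro svg _
  unfold Spec_apply_dark_mode_py apply_dark_mode_py_alt
  rw [A_eq_chain, chain_eq_altGo svg.toList.length svg.toList le_rfl]
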